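-- pv_equiv track=rewrite | github.com/ckdals4600/BaekJoon | 프로그래머스/3/150367. 표현 가능한 이진트리/표현 가능한 이진트리.py | solution
-- ===== SOURCE A (Python) =====
-- import math
--
-- def solution(numbers):
--     answer = []
--
--     def changeBi(number):
--         bi = bin(number)[2:]
--
--         sq = math.log2(len(bi)+1)
--         if sq != sq//1:
--             addZero = int(2**((sq//1) + 1)) - (len(bi) + 1)
--             bi = "0" * addZero + bi
--
--         return bi
--
--     def binaryTree(bi, parent):
--         mid_idx = len(bi)//2
--         mid = bi[mid_idx]
--
--         if mid == "0" and parent == "-1":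
--             return 0
--
--         if mid == "1" and parent == "0":
--             return 0
--
--         if mid_idx == 0:
--             return 1
--
--         return binaryTree(bi[:mid_idx], mid) & binaryTree(bi[mid_idx+1:], mid)
--
--     for number in numbers:
--         bi = changeBi(number)
--         answer.append(binaryTree(bi, "-1"))
--
--     return answer
-- ===== SOURCE B (Python) =====
-- import math
--
-- def changeBi(number):
--     bi = bin(number)[2:]
--     sq = math.log2(len(bi)+1)
--     if sq != sq//1:
--         addZero = int(2**((sq//1) + 1)) - (len(bi) + 1)
--         bi = "0" * addZero + bi
--     return bi
--
-- def solution(numbers):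
--     answer = []
--     for number in numbers:
--         bi = changeBi(number)
--         valid = 1
--         stack = [(0, len(bi), "-1")]
--         while stack:
--             lo, hi, parent = stack.pop()
--             mid = (lo + hi) // 2
--             c = bi[mid]
--             if c == "0" and parent == "-1":
--                 valid = 0
--                 break
--             if c == "1" and parent == "0":
--                 valid = 0
--                 break
--             if hi - lo > 1:
--                 stack.append((lo, mid, c))
--                 stack.append((mid + 1, hi, c))
--         answer.append(valid)
--     return answer
-- ===== Notes on version B (the rewrite author's own statement) =====
-- stated objective: alternative
-- what changed: The recursive binaryTree over string slices is replaced by an iterative validator driven by an explicit stack of (lo, hi, parent) index ranges over the unsliced binary string; changeBi is kept verbatim.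
import Mathlib
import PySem

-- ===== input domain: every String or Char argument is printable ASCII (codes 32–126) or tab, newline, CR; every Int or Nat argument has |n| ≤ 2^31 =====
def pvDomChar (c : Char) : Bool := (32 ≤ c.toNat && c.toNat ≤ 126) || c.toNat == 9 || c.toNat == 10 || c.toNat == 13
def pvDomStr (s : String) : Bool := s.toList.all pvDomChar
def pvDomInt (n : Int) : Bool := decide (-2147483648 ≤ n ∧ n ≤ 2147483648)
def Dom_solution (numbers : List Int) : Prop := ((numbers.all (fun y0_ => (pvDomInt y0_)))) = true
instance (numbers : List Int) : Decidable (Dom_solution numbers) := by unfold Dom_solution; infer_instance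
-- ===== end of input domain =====

-- B replaces A's recursive slicing validator by an explicit stack of (lo, hi, parent) index
-- ranges over the unsliced binary string (objective: alternative; changeBi is kept verbatim).

-- ===== PORT A =====
-- binary digits of a Nat, most significant first; 'bin(n)' without its '0b' prefix (exact, hand port)
def pvBits (n : Nat) : List Char :=
  if n = 0 then [] else pvBits (n / 2) ++ [if n % 2 = 1 then '1' else '0']
decreasing_by omega

-- 'bin(number)[2:]'; for negative numbers '[2:]' keeps the 'b' of '-0b…' (exact, hand port)
def pvBin (number : Int) : List Char :=
  if number < 0 then 'b' :: pvBits (-number).toNat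
  else if number = 0 then ['0'] else pvBits number.toNat

-- changeBi: Python tests 'sq != sq//1' with sq = log2(len+1); for these small lengths the float
-- test is exactly 'len+1 is not a power of two' and 'sq//1' is exactly Nat.log2 (len+1)
def changeBi (number : Int) : List Char :=
  if (pvBin number).length + 1 ≠ 2 ^ Nat.log2 ((pvBin number).length + 1) then
    List.replicate (2 ^ (Nat.log2 ((pvBin number).length + 1) + 1) - ((pvBin number).length + 1)) '0'
      ++ pvBin number
  else pvBin number

-- A's recursive validator over string slices; 'parent' is the 1-char (or "-1") Python string.
-- bi[mid_idx] ported as getD (in-range on every call A makes); '&' is Int.land.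
def binaryTreeA (bi : List Char) (parent : List Char) : Int :=
  let mid_idx := bi.length / 2
  let mid := bi.getD mid_idx ' '
  if mid = '0' ∧ parent = ['-', '1'] then 0
  else if mid = '1' ∧ parent = ['0'] then 0
  else if mid_idx = 0 then 1
  else Int.land (binaryTreeA (bi.take mid_idx) [mid]) (binaryTreeA (bi.drop (mid_idx + 1)) [mid])
termination_by bi.length
decreasing_by
  · simp only [List.length_take]; omega
  · simp only [List.length_drop]; omega

def solution (numbers : List Int) : List Int :=
  numbers.foldl (fun answer number => answer ++ [binaryTreeA (changeBi number) ['-', '1']]) []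

-- ===== PORT B =====
-- the while loop over the explicit stack; Python pushes left then right and pops the right
-- one first, so with head-as-top the right segment is consed on top; break ⇒ return 0
def loopB (bi : List Char) (stack : List (Nat × Nat × List Char)) : Int :=
  match stack with
  | [] => 1
  | (lo, hi, parent) :: rest =>
    let mid := (lo + hi) / 2
    let c := bi.getD mid ' '
    if c = '0' ∧ parent = ['-', '1'] then 0
    else if c = '1' ∧ parent = ['0'] then 0
    else if hi - lo > 1 then loopB bi ((mid + 1, hi, [c]) :: (lo, mid, [c]) :: rest)
    else loopB bi rest
termination_by 2 * (stack.map (fun s => s.2.1 - s.1)).sum + stack.length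
decreasing_by all_goals simp only [List.map_cons, List.sum_cons, List.length_cons]; omega

def solution_alt (numbers : List Int) : List Int :=
  numbers.map (fun number =>
    let bi := changeBi number
    loopB bi [(0, bi.length, ['-', '1'])])

-- ===== PRECONDITION & SPEC =====
def Spec_solution (numbers : List Int) (out : List Int) : Prop := out = solution_alt numbers
instance (numbers : List Int) (out : List Int) : Decidable (Spec_solution numbers out) := by unfold Spec_solution; infer_instance

-- ===== CLAIM (what is proved, stated in full; the proofs are below) =====
def Claim_equal_solution : Prop := ∀ (numbers : List Int), Dom_solution numbers → Spec_solution numbers (solution numbers)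

-- ===== LEMMAS AND PROOFS =====

lemma land01 (a b : Int) (ha : a = 0 ∨ a = 1) (hb : b = 0 ∨ b = 1) :
    Int.land a b = 0 ∨ Int.land a b = 1 := by
  rcases ha with h|h <;> rcases hb with h'|h' <;> subst h <;> subst h' <;> decide

lemma binaryTreeA_01 (bi parent : List Char) :
    binaryTreeA bi parent = 0 ∨ binaryTreeA bi parent = 1 := by
  rw [binaryTreeA]
  split_ifs with h1 h2 h3
  · left; rfl
  · left; rfl
  · right; rfl
  · exact land01 _ _ (binaryTreeA_01 _ _) (binaryTreeA_01 _ _)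
termination_by bi.length
decreasing_by
  · simp only [List.length_take]; omega
  · simp only [List.length_drop]; omega

lemma loopB_01 (bi : List Char) (stack : List (Nat × Nat × List Char)) :
    loopB bi stack = 0 ∨ loopB bi stack = 1 := by
  match stack with
  | [] => right; rw [loopB]
  | (lo, hi, parent) :: rest =>
    rw [loopB]
    split_ifs with h1 h2 h3
    · left; rfl
    · left; rfl
    · exact loopB_01 bi _
    · exact loopB_01 bi rest
termination_by 2 * (stack.map (fun s => s.2.1 - s.1)).sum + stack.length
decreasing_by all_goals simp only [List.map_cons, List.sum_cons, List.length_cons]; omega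

lemma loop_seg (bi : List Char) (k lo hi : Nat) (p : List Char)
    (rest : List (Nat × Nat × List Char))
    (hk : hi - lo = 2 ^ k - 1) (hlt : lo < hi) (hle : hi ≤ bi.length) :
    loopB bi ((lo, hi, p) :: rest)
      = Int.land (binaryTreeA ((bi.drop lo).take (hi - lo)) p) (loopB bi rest) := by
  induction k generalizing lo hi p rest with
  | zero => omega
  | succ k ih =>
    have hm : 1 ≤ 2 ^ k := Nat.one_le_two_pow
    have h2 : 2 ^ (k + 1) = 2 * 2 ^ k := by ring
    set s : List Char := (bi.drop lo).take (hi - lo) with hs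
    have hslen : s.length = hi - lo := by
      simp only [hs, List.length_take, List.length_drop]; omega
    have hidx : lo + (hi - lo) / 2 = (lo + hi) / 2 := by omega
    have hsmid : s.getD ((hi - lo) / 2) ' ' = bi.getD ((lo + hi) / 2) ' ' := by
      simp only [hs, List.getD, List.getElem?_take, List.getElem?_drop,
        if_pos (show (hi - lo) / 2 < hi - lo by omega), hidx]
    rw [loopB, binaryTreeA]
    simp only [hslen, hsmid]
    set c : Char := bi.getD ((lo + hi) / 2) ' ' with hc
    by_cases h1 : c = '0' ∧ p = ['-', '1']
    · rw [if_pos h1, if_pos h1]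
      rcases loopB_01 bi rest with h|h <;> rw [h] <;> decide
    · rw [if_neg h1, if_neg h1]
      by_cases hB : c = '1' ∧ p = ['0']
      · rw [if_pos hB, if_pos hB]
        rcases loopB_01 bi rest with h|h <;> rw [h] <;> decide
      · rw [if_neg hB, if_neg hB]
        by_cases hbig : hi - lo > 1
        · rw [if_pos hbig, if_neg (by omega : ¬ (hi - lo) / 2 = 0)]
          have hk1 : 1 ≤ k := by
            by_contra hcon
            have : k = 0 := by omega
            subst this
            simp at h2
            omega
          set mid := (lo + hi) / 2 with hmid
          have e1 : s.take ((hi - lo) / 2) = (bi.drop lo).take (mid - lo) := by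
            rw [hs, List.take_take]
            rw [show min ((hi - lo) / 2) (hi - lo) = mid - lo by omega]
          have e2 : s.drop ((hi - lo) / 2 + 1) = (bi.drop (mid + 1)).take (hi - (mid + 1)) := by
            rw [hs, List.drop_take, List.drop_drop]
            rw [show hi - lo - ((hi - lo) / 2 + 1) = hi - (mid + 1) by omega,
               show lo + ((hi - lo) / 2 + 1) = mid + 1 by omega]
          rw [e1, e2]
          rw [ih (mid + 1) hi [c] ((lo, mid, [c]) :: rest) (by omega) (by omega) (by omega)]
          rw [ih lo mid [c] rest (by omega) (by omega) (by omega)]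
          rcases binaryTreeA_01 ((bi.drop lo).take (mid - lo)) [c] with hL|hL <;>
            rcases binaryTreeA_01 ((bi.drop (mid + 1)).take (hi - (mid + 1))) [c] with hR|hR <;>
            rcases loopB_01 bi rest with hT|hT <;>
            rw [hL, hR, hT] <;> decide
        · rw [if_neg hbig, if_pos (by omega : (hi - lo) / 2 = 0)]
          rcases loopB_01 bi rest with h|h <;> rw [h] <;> decide

lemma pvBin_len (n : Int) : 1 ≤ (pvBin n).length := by
  unfold pvBin
  split_ifs with h1 h2
  · simp
  · simp
  · rw [pvBits, if_neg (by omega : ¬ n.toNat = 0)]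
    simp

lemma changeBi_len (n : Int) : ∃ k, 1 ≤ k ∧ (changeBi n).length = 2 ^ k - 1 := by
  unfold changeBi
  have hb := pvBin_len n
  set L := (pvBin n).length with hL
  split_ifs with h
  · refine ⟨Nat.log2 (L + 1) + 1, by omega, ?_⟩
    have hlt : L + 1 < 2 ^ (Nat.log2 (L + 1) + 1) := Nat.lt_log2_self
    simp only [List.length_append, List.length_replicate]
    omega
  · push Not at h
    refine ⟨Nat.log2 (L + 1), ?_, by omega⟩
    by_contra hc
    have : Nat.log2 (L + 1) = 0 := by omega
    rw [this] at h
    simp at h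
    omega

lemma per_elem (n : Int) :
    binaryTreeA (changeBi n) ['-', '1']
      = loopB (changeBi n) [(0, (changeBi n).length, ['-', '1'])] := by
  obtain ⟨k, hk1, hlen⟩ := changeBi_len n
  have hpos : 1 ≤ (changeBi n).length := by
    have : 2 ≤ 2 ^ k := by
      calc 2 = 2 ^ 1 := by norm_num
      _ ≤ 2 ^ k := Nat.pow_le_pow_right (by norm_num) hk1
    omega
  rw [loop_seg (changeBi n) k 0 (changeBi n).length ['-', '1'] []
      (by omega) (by omega) (le_refl _)]
  rw [List.drop_zero, Nat.sub_zero, List.take_length, loopB]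
  rcases binaryTreeA_01 (changeBi n) ['-', '1'] with h|h <;> rw [h] <;> decide

lemma foldl_app (f : Int → Int) (l : List Int) (acc : List Int) :
    l.foldl (fun a n => a ++ [f n]) acc = acc ++ l.map f := by
  induction l generalizing acc with
  | nil => simp
  | cons x xs ih => simp [List.foldl, ih]

-- ===== VERDICT (by name: the statement is the Claim_ definition above) =====
theorem solution_spec : Claim_equal_solution := by
  intro numbers _
  unfold Spec_solution solution solution_alt
  rw [foldl_app]
  simp only [List.nil_append]
  exact List.map_congr_left (fun n _ => per_elem n)
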